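-- pv_equiv track=rewrite | github.com/gregconner/triangular-number-analysis | TriangularSquareDiff_v0.1.7.py | is_square_of_triangular_of_square_of_triangular
-- ===== SOURCE A (Python) =====
-- import math
--
-- def triangular_number(n):
--     """Calculate the nth triangular number: T_n = n(n+1)/2"""
--     return n * (n + 1) // 2
--
-- def is_perfect_square(x):
--     """Check if a number is a perfect square"""
--     if x < 0:
--         return False
--     root = int(math.sqrt(x))
--     return root * root == x
--
-- def is_square_of_triangular_of_square_of_triangular(x):
--     """
--     Check if a number is the square of the triangular number of the square of a triangular number.
--     This means x = (T_(T_n²))² for some n.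
--     Returns (is_square_of_triangular_of_square_of_triangular, n) where n is the triangular number index.
--     """
--     # We need to find n such that x = (T_(T_n²))²
--     # This means x = (T_n² * (T_n² + 1) / 2)²
--
--     # First check if x is a perfect square
--     if not is_perfect_square(x):
--         return False, 0
--
--     sqrt_x = int(math.sqrt(x))
--
--     # Try different values of n to see if sqrt_x = T_(T_n²)
--     max_n = 10  # Even smaller bound since this grows very quickly
--
--     for n in range(1, max_n + 1):
--         T_n = triangular_number(n)
--         T_n_squared = T_n * T_n
--         T_of_T_n_squared = triangular_number(T_n_squared)
--
--         if T_of_T_n_squared == sqrt_x: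
--             return True, n
--         elif T_of_T_n_squared > sqrt_x:
--             break  # No point continuing if we've exceeded sqrt_x
--
--     return False, 0
-- ===== SOURCE B (Python) =====
-- import math
--
-- def _is_sq(x):
--     if x < 0:
--         return False
--     r = int(math.sqrt(x))
--     return r * r == x
--
-- def _tri_index(s):
--     """Return n >= 0 with n*(n+1)//2 == s, or None if s is not triangular."""
--     d = 8 * s + 1
--     if not _is_sq(d):
--         return None
--     r = int(math.sqrt(d))
--     if r % 2 == 0:
--         return None
--     return (r - 1) // 2
--
-- def _decode(s):
--     """Invert s = T_(T_n**2) layer by layer; accept only 1 <= n <= 10."""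
--     m = _tri_index(s)            # m should be T_n ** 2
--     if m is None or not _is_sq(m):
--         return False, 0
--     t = int(math.sqrt(m))        # t should be T_n
--     n = _tri_index(t)
--     if n is None or not (1 <= n <= 10):
--         return False, 0
--     return True, n
--
-- def is_square_of_triangular_of_square_of_triangular(x):
--     if not _is_sq(x):
--         return False, 0
--     return _decode(int(math.sqrt(x)))
-- ===== Notes on version B (the rewrite author's own statement) =====
-- stated objective: alternative
-- what changed: B inverts the construction layer by layer (perfect-square check, then two triangular-index recoveries via the 8s+1 discriminant and one square root), recovering n directly instead of A's forward search over n = 1..10.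
import Mathlib
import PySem

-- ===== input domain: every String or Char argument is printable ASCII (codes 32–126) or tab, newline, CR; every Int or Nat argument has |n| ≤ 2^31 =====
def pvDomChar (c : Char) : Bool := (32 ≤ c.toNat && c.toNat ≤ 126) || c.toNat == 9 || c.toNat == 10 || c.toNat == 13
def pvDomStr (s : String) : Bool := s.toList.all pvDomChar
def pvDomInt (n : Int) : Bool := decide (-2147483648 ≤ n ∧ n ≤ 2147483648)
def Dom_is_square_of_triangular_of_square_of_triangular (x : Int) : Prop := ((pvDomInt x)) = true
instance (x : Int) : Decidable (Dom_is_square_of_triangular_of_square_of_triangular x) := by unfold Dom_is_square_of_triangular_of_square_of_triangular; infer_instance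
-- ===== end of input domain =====

-- B inverts the construction x = (T_(T_n²))² layer by layer (triangular/square tests via the 8s+1
-- discriminant) instead of A's forward search over n = 1..10; objective: alternative decomposition.

-- ===== PORT A =====

-- T_n = n(n+1)//2
def triangular_number (n : Int) : Int := PySem.Int.floordiv (n * (n + 1)) 2

-- int(math.sqrt x): exact integer sqrt on the magnitudes reached inside Dom (|x| ≤ 2^31 < 2^52)
def py_isqrt (x : Int) : Int := (Nat.sqrt x.toNat : Int)

def is_perfect_square (x : Int) : Bool :=
  if x < 0 then false
  else
    let root := py_isqrt x
    root * root == x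

-- the for-loop of A over range(1, max_n + 1) with its break
def aLoop (sqrt_x : Int) : List Int → Bool × Int
  | [] => (false, 0)
  | n :: rest =>
    let T_n := triangular_number n
    let T_n_squared := T_n * T_n
    let T_of_T_n_squared := triangular_number T_n_squared
    if T_of_T_n_squared == sqrt_x then (true, n)
    else if T_of_T_n_squared > sqrt_x then (false, 0)
    else aLoop sqrt_x rest

def is_square_of_triangular_of_square_of_triangular (x : Int) : Bool × Int :=
  if !is_perfect_square x then (false, 0)
  else aLoop (py_isqrt x) (PySem.List.pyRange 1 11 1)

-- ===== PORT B =====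

-- _tri_index: the n with T_n = s recovered from the 8s+1 discriminant, or none
def tri_index (s : Int) : Option Int :=
  let d := 8 * s + 1
  if !is_perfect_square d then none
  else
    let r := py_isqrt d
    if PySem.Int.mod r 2 == 0 then none
    else some (PySem.Int.floordiv (r - 1) 2)

-- _decode: invert s = T_(T_n²) layer by layer; accept only 1 ≤ n ≤ 10
def decode (s : Int) : Bool × Int :=
  match tri_index s with
  | none => (false, 0)
  | some m =>
    if !is_perfect_square m then (false, 0)
    else
      match tri_index (py_isqrt m) with
      | none => (false, 0)
      | some n => if 1 ≤ n ∧ n ≤ 10 then (true, n) else (false, 0)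

def is_square_of_triangular_of_square_of_triangular_alt (x : Int) : Bool × Int :=
  if !is_perfect_square x then (false, 0)
  else decode (py_isqrt x)

-- ===== PRECONDITION & SPEC =====
def Spec_is_square_of_triangular_of_square_of_triangular (x : Int) (out : Bool × Int) : Prop := out = is_square_of_triangular_of_square_of_triangular_alt x
instance (x : Int) (out : Bool × Int) : Decidable (Spec_is_square_of_triangular_of_square_of_triangular x out) := by unfold Spec_is_square_of_triangular_of_square_of_triangular; infer_instance

-- ===== CLAIM (what is proved, stated in full; the proofs are below) =====
def Claim_equal_is_square_of_triangular_of_square_of_triangular : Prop := ∀ (x : Int), Dom_is_square_of_triangular_of_square_of_triangular x → Spec_is_square_of_triangular_of_square_of_triangular x (is_square_of_triangular_of_square_of_triangular x)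

-- ===== LEMMAS AND PROOFS =====

lemma py_isqrt_nonneg (x : Int) : 0 ≤ py_isqrt x := by
  simp [py_isqrt]

lemma ips_elim {x : Int} (h : is_perfect_square x = true) :
    py_isqrt x * py_isqrt x = x := by
  unfold is_perfect_square at h
  split at h
  · simp at h
  · simpa using h

lemma py_isqrt_sq {k : Int} (hk : 0 ≤ k) : py_isqrt (k * k) = k := by
  obtain ⟨n, rfl⟩ := Int.eq_ofNat_of_zero_le hk
  unfold py_isqrt
  have h1 : ((n : Int) * n).toNat = n * n := by
    rw [show ((n : Int) * n) = ((n * n : Nat) : Int) by push_cast; ring, Int.toNat_natCast]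
  rw [h1, Nat.sqrt_eq]

lemma ips_sq {k : Int} (hk : 0 ≤ k) : is_perfect_square (k * k) = true := by
  unfold is_perfect_square
  rw [if_neg (by nlinarith)]
  simp [py_isqrt_sq hk]

lemma tri_nonneg {n : Int} (hn : 0 ≤ n) : 0 ≤ triangular_number n := by
  unfold triangular_number
  rw [PySem.Int.floordiv_eq_ediv_of_pos (by norm_num)]
  exact Int.ediv_nonneg (by nlinarith) (by norm_num)

lemma tri_index_some {s m : Int} (h : tri_index s = some m) :
    0 ≤ m ∧ 2 * s = m * (m + 1) := by
  unfold tri_index at h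
  dsimp only at h
  by_cases hsq : is_perfect_square (8 * s + 1) = true
  · rw [hsq] at h
    simp only [Bool.not_true, Bool.false_eq_true, if_false] at h
    have hr2 : py_isqrt (8 * s + 1) * py_isqrt (8 * s + 1) = 8 * s + 1 := ips_elim hsq
    set r := py_isqrt (8 * s + 1) with hr
    have hr0 : 0 ≤ r := py_isqrt_nonneg _
    by_cases hmod : PySem.Int.mod r 2 == 0
    · rw [if_pos hmod] at h; cases h
    · rw [if_neg hmod] at h
      have hodd : r % 2 ≠ 0 := by
        rw [PySem.Int.mod_eq_emod_of_pos (by norm_num)] at hmod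
        simpa using hmod
      have hm : m = (r - 1) / 2 := by
        have := h
        rw [PySem.Int.floordiv_eq_ediv_of_pos (by norm_num)] at this
        exact (Option.some.injEq _ _ ▸ this).symm
      have hrm : r = 2 * m + 1 ∧ 0 ≤ m := by omega
      obtain ⟨hrm, hm0⟩ := hrm
      rw [hrm] at hr2
      refine ⟨hm0, by nlinarith [hr2]⟩
  · rw [Bool.not_eq_true] at hsq
    rw [hsq] at h
    simp at h

lemma tri_index_of_tri {m : Int} (hm : 0 ≤ m) :
    tri_index (triangular_number m) = some m := by
  have heven : ∃ k : Int, m * (m + 1) = 2 * k := (Int.even_mul_succ_self m).exists_two_nsmul _ |>.imp (fun k h => by omega)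
  obtain ⟨k, hk⟩ := heven
  have hs : triangular_number m = k := by
    unfold triangular_number
    rw [hk, PySem.Int.floordiv_eq_ediv_of_pos (by norm_num), Int.mul_ediv_cancel_left _ (by norm_num)]
  have h8 : 8 * triangular_number m + 1 = (2 * m + 1) * (2 * m + 1) := by
    rw [hs]; nlinarith [hk]
  unfold tri_index
  dsimp only
  rw [h8, ips_sq (by omega), py_isqrt_sq (by omega)]
  simp only [Bool.not_true, Bool.false_eq_true, if_false]
  rw [if_neg (by simp)]
  congr 1
  rw [show 2 * m + 1 - 1 = 2 * m by ring, PySem.Int.floordiv_eq_ediv_of_pos (by norm_num),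
    Int.mul_ediv_cancel_left _ (by norm_num)]

-- decode accepts exactly the forward images T_(T_n²), 1 ≤ n ≤ 10
lemma decode_tri {n : Int} (h1 : 1 ≤ n) (h10 : n ≤ 10) :
    decode (triangular_number (triangular_number n * triangular_number n)) = (true, n) := by
  have ht0 : 0 ≤ triangular_number n := tri_nonneg (by omega)
  have hm0 : 0 ≤ triangular_number n * triangular_number n := mul_nonneg ht0 ht0
  unfold decode
  rw [tri_index_of_tri hm0]
  simp only [ips_sq ht0, Bool.not_true, Bool.false_eq_true, if_false]
  rw [py_isqrt_sq ht0, tri_index_of_tri (by omega : (0:Int) ≤ n)]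
  simp [h1, h10]

lemma decode_cases (s : Int) :
    decode s = (false, 0) ∨
    ∃ n m t : Int, decode s = (true, n) ∧ 1 ≤ n ∧ n ≤ 10 ∧
      2 * s = m * (m + 1) ∧ t * t = m ∧ 0 ≤ t ∧ 2 * t = n * (n + 1) := by
  unfold decode
  cases htri : tri_index s with
  | none => left; rfl
  | some m =>
    obtain ⟨hm0, hsm⟩ := tri_index_some htri
    by_cases hsq : is_perfect_square m = true
    · simp only [hsq, Bool.not_true, Bool.false_eq_true, if_false]
      cases htri2 : tri_index (py_isqrt m) with
      | none => left; rfl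
      | some n =>
        obtain ⟨hn0, htn⟩ := tri_index_some htri2
        by_cases hr : 1 ≤ n ∧ n ≤ 10
        · right
          exact ⟨n, m, py_isqrt m, by simp [hr], hr.1, hr.2, hsm, ips_elim hsq,
            py_isqrt_nonneg m, htn⟩
        · left; simp [hr]
    · rw [Bool.not_eq_true] at hsq
      left; simp [hsq]

-- the loop returns (false, 0) whenever no listed n matches
lemma aLoop_none (s : Int) (L : List Int)
    (h : ∀ n ∈ L, triangular_number (triangular_number n * triangular_number n) ≠ s) :
    aLoop s L = (false, 0) := by
  induction L with
  | nil => rfl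
  | cons a L ih =>
    simp only [aLoop]
    rw [if_neg (by simpa using h a List.mem_cons_self)]
    split
    · rfl
    · exact ih (fun n hn => h n (List.mem_cons_of_mem _ hn))

lemma main_core (s : Int) : aLoop s (PySem.List.pyRange 1 11 1) = decode s := by
  rcases decode_cases s with hdec | ⟨n, m, t, hdec, hn1, hn10, hsm, htm, ht0, htn⟩
  · rw [hdec]
    apply aLoop_none
    intro k hk heq
    rw [PySem.List.mem_pyRange_one] at hk
    rw [← heq, decode_tri hk.1 (by omega)] at hdec
    cases hdec
  · rw [hdec]
    -- reconstruct s = T_(T_n²) from the decoded layers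
    have htri_n : triangular_number n = t := by
      unfold triangular_number
      rw [show n * (n + 1) = 2 * t from htn.symm, PySem.Int.floordiv_eq_ediv_of_pos (by norm_num),
        Int.mul_ediv_cancel_left _ (by norm_num)]
    have htri_m : triangular_number m = s := by
      unfold triangular_number
      rw [show m * (m + 1) = 2 * s from hsm.symm, PySem.Int.floordiv_eq_ediv_of_pos (by norm_num),
        Int.mul_ediv_cancel_left _ (by norm_num)]
    have hs : s = triangular_number (triangular_number n * triangular_number n) := by
      rw [htri_n, htm, htri_m]
    rw [hs]
    interval_cases n <;> decide

-- ===== VERDICT (by name: the statement is the Claim_ definition above) =====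
theorem is_square_of_triangular_of_square_of_triangular_spec : Claim_equal_is_square_of_triangular_of_square_of_triangular := by
  intro x _
  unfold Spec_is_square_of_triangular_of_square_of_triangular
  unfold is_square_of_triangular_of_square_of_triangular is_square_of_triangular_of_square_of_triangular_alt
  by_cases h : is_perfect_square x = true
  · simp only [h, Bool.not_true, Bool.false_eq_true, if_false]
    exact main_core (py_isqrt x)
  · rw [Bool.not_eq_true] at h
    simp [h]
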